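-- pv_equiv track=rewrite | github.com/spotify/cstar | cstar/endpoint_mapping.py | _parse_range_mapping
-- ===== SOURCE A (Python) =====
-- def _parse_range_mapping(ranges):
--     mapping = {}
--     for range in ranges:
--         for host1 in range.get("endpoints"):
--             for host2 in range.get("endpoints"):
--                 if host1 != host2:
--                     mapping.setdefault(host1, set()).add(host2)
--     return mapping
-- ===== SOURCE B (Python) =====
-- def _parse_range_mapping(ranges):
--     # Stage 1: gather, per host, the concatenated endpoint lists of every
--     # range with at least two distinct endpoints that the host occurs in.
--     pools = {}
--     for rng in ranges:
--         endpoints = rng.get("endpoints")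
--         if len(set(endpoints)) > 1:
--             for host in endpoints:
--                 pools.setdefault(host, []).extend(endpoints)
--     # Stage 2: each host maps to every pooled endpoint except itself.
--     return {host: {e for e in pool if e != host} for host, pool in pools.items()}
-- ===== Notes on version B (the rewrite author's own statement) =====
-- stated objective: alternative
-- what changed: A builds the mapping with a per-range nested pairwise host1/host2 scan adding one partner at a time; B is a two-stage pipeline: a first pass groups ranges by host, pooling the concatenated endpoint lists of every multi-endpoint range a host occurs in, and a second pass derives each host's set in one shot as the pool minus the host itself.
import Mathlib
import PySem

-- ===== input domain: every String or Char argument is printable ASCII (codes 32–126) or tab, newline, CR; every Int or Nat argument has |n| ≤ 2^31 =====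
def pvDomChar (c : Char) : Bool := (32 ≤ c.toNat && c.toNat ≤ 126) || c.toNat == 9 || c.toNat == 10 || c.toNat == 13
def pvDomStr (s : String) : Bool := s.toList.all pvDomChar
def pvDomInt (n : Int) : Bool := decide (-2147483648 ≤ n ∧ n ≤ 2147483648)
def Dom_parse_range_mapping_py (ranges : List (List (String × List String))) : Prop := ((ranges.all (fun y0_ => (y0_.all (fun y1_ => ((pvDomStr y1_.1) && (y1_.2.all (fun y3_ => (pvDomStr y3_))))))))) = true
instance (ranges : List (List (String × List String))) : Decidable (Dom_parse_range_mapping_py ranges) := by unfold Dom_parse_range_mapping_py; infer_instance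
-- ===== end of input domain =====

-- B replaces A's per-range nested pairwise scan with a two-stage pipeline: first group
-- ranges by host (pooling the concatenated endpoint lists of multi-endpoint ranges),
-- then derive each host's partner set in one shot as its pool minus the host itself.

-- ===== PORT A =====
-- On a range without the key "endpoints" Python A raises TypeError (iterating None);
-- the port takes [] there — those inputs are excluded by Pre_ below.
def parse_range_mapping_py (ranges : List (List (String × List String))) : List (String × List String) :=
  (ranges.foldl (fun (m : PySem.Dict String (PySem.Set String)) r =>
      let eps := ((PySem.Dict.ofList r).get? "endpoints").getD []
      eps.foldl (fun m host1 =>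
        eps.foldl (fun m host2 =>
          if host1 ≠ host2 then m.modify host1 [] (fun s => PySem.Set.add s host2) else m) m) m)
    PySem.Dict.empty).items

-- ===== PORT B =====
def parse_range_mapping_py_alt (ranges : List (List (String × List String))) : List (String × List String) :=
  (ranges.foldl (fun (g : PySem.Dict String (List String)) r =>
      let endpoints := ((PySem.Dict.ofList r).get? "endpoints").getD []
      if 1 < (PySem.Set.ofList endpoints).length then
        endpoints.foldl (fun g host => g.modify host [] (fun pool => pool ++ endpoints)) g
      else g)
    PySem.Dict.empty).items.map (fun p => (p.1, PySem.Set.ofList (p.2.filter (fun e => e != p.1))))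

-- ===== PRECONDITION & SPEC =====
-- Pre_ excludes exactly the ranges lacking the key "endpoints": there `range.get("endpoints")`
-- is None and Python A raises TypeError iterating it.
def Pre_parse_range_mapping_py (ranges : List (List (String × List String))) : Prop :=
  (ranges.all (fun r => (PySem.Dict.ofList r).contains "endpoints") = true)
instance (ranges : List (List (String × List String))) : Decidable (Pre_parse_range_mapping_py ranges) := by
  unfold Pre_parse_range_mapping_py; infer_instance

def pvWitness_parse_range_mapping_py : (List (List (String × List String))) :=
  [[("endpoints", ["a", "b", "c"]), ("dc", ["x"])], [("endpoints", ["b", "d"])]]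

def Spec_parse_range_mapping_py (ranges : List (List (String × List String))) (out : List (String × List String)) : Prop := out = parse_range_mapping_py_alt ranges
instance (ranges : List (List (String × List String))) (out : List (String × List String)) : Decidable (Spec_parse_range_mapping_py ranges out) := by unfold Spec_parse_range_mapping_py; infer_instance

-- ===== CLAIM (what is proved, stated in full; the proofs are below) =====
def Claim_equal_parse_range_mapping_py : Prop := ∀ (ranges : List (List (String × List String))), Dom_parse_range_mapping_py ranges → Pre_parse_range_mapping_py ranges → Spec_parse_range_mapping_py ranges (parse_range_mapping_py ranges)

-- ===== LEMMAS AND PROOFS =====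

-- two modifies at the same key compose
theorem pv_modify_modify (d : PySem.Dict String (PySem.Set String)) (k : String)
    (d0 : PySem.Set String) (f g : PySem.Set String → PySem.Set String) :
    (d.modify k d0 f).modify k d0 g = d.modify k d0 (fun v => g (f v)) := by
  simp [PySem.Dict.modify, PySem.Dict.getD_insert_self, PySem.Dict.insert_insert_self]

-- a loop of add-modifies at one key is a single update-modify (when it runs at all)
theorem pv_foldl_modify_add (xs : List String) (k : String)
    (m : PySem.Dict String (PySem.Set String)) (hne : xs ≠ []) :
    xs.foldl (fun m h2 => m.modify k [] (fun s => PySem.Set.add s h2)) m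
      = m.modify k [] (fun s => PySem.Set.update s xs) := by
  induction xs generalizing m with
  | nil => exact absurd rfl hne
  | cons x rest ih =>
    simp only [List.foldl_cons]
    by_cases hr : rest = []
    · subst hr
      rfl
    · rw [ih _ hr, pv_modify_modify]
      have hupd : (fun s : PySem.Set String => PySem.Set.update s (x :: rest))
          = (fun v : PySem.Set String => PySem.Set.update (PySem.Set.add v x) rest) :=
        funext (fun s => by rw [PySem.Set.update_cons])
      rw [hupd]

-- updating with set(xs) is updating with xs
theorem pv_update_ofList (s : PySem.Set String) (xs : List String) :
    PySem.Set.update s (PySem.Set.ofList xs) = PySem.Set.update s xs := by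
  rw [PySem.Set.update_eq_append_filter, PySem.Set.update_eq_append_filter,
    PySem.Set.ofList_ofList]

-- ofList commutes with filter
theorem pv_ofList_filter (p : String → Bool) (xs : List String) :
    PySem.Set.ofList (xs.filter p) = (PySem.Set.ofList xs).filter p := by
  induction xs with
  | nil => rfl
  | cons x xs ih =>
    rw [PySem.Set.ofList_cons, List.filter_cons]
    by_cases hx : p x = true
    · rw [if_pos hx, PySem.Set.ofList_cons, ih, List.filter_cons, if_pos hx]
      congr 1
      simp only [PySem.Set.discard, List.filter_filter]
      congr 1
      funext y
      rw [Bool.and_comm]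
    · rw [if_neg hx, ih, List.filter_cons, if_neg hx]
      simp only [PySem.Set.discard, List.filter_filter]
      refine (List.filter_congr ?_).symm
      intro a ha
      by_cases hax : a = x
      · subst hax; simp [hx]
      · simp [hax]

-- the complement set, as a filter of the endpoint list
theorem pv_diff_singleton (eps : List String) (h1 : String) :
    PySem.Set.diff (PySem.Set.ofList eps) [h1]
      = PySem.Set.ofList (eps.filter (fun x => decide (h1 ≠ x))) := by
  rw [pv_ofList_filter]
  simp only [PySem.Set.diff]
  congr 1
  funext x
  by_cases hx : x = h1
  · simp [hx]
  · simp [hx, Ne.symm hx]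

-- A's inner loop, characterised
theorem pv_innerA (eps : List String) (h1 : String) (m : PySem.Dict String (PySem.Set String)) :
    eps.foldl (fun m host2 =>
        if h1 ≠ host2 then m.modify h1 [] (fun s => PySem.Set.add s host2) else m) m
      = if eps.filter (fun x => decide (h1 ≠ x)) = [] then m
        else m.modify h1 [] (fun s =>
          PySem.Set.update s (PySem.Set.diff (PySem.Set.ofList eps) [h1])) := by
  rw [PySem.List.foldl_ite_eq_foldl_filter]
  by_cases h : eps.filter (fun x => decide (h1 ≠ x)) = []
  · rw [if_pos h, h, List.foldl_nil]
  · rw [if_neg h, pv_foldl_modify_add _ _ _ h]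
    congr 1
    funext s
    rw [pv_diff_singleton, pv_update_ofList]

-- two members of a short list coincide
theorem pv_eq_of_small (l : List String) (h : l.length < 2) (a b : String)
    (ha : a ∈ l) (hb : b ∈ l) : a = b := by
  match l with
  | [] => cases ha
  | [c] =>
    rw [List.mem_singleton] at ha hb
    rw [ha, hb]
  | c :: d :: t => simp at h

-- a nodup list of length ≥ 2 has an element different from any given one
theorem pv_exists_other (l : List String) (hnd : l.Nodup) (h : ¬ l.length < 2)
    (a : String) : ∃ y ∈ l, y ≠ a := by
  match l with
  | [] => simp at h
  | [c] => simp at h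
  | c :: d :: t =>
    by_cases hc : c = a
    · refine ⟨d, by simp, ?_⟩
      have hcd : c ≠ d := by
        intro he
        exact (List.nodup_cons.1 hnd).1 (by rw [he]; exact List.mem_cons_self)
      intro hd
      exact hcd (hc.trans hd.symm)
    · exact ⟨c, by simp, hc⟩

theorem pv_filter_nil_of_small (eps : List String) (h1 : String) (hm : h1 ∈ eps)
    (hlen : (PySem.Set.ofList eps).length < 2) :
    eps.filter (fun x => decide (h1 ≠ x)) = [] := by
  rw [List.filter_eq_nil_iff]
  intro a ha
  have : a = h1 := pv_eq_of_small _ hlen a h1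
    ((PySem.Set.mem_ofList _ _).2 ha) ((PySem.Set.mem_ofList _ _).2 hm)
  simp [this]

theorem pv_filter_ne_nil_of_big (eps : List String) (h1 : String)
    (hlen : ¬ (PySem.Set.ofList eps).length < 2) :
    eps.filter (fun x => decide (h1 ≠ x)) ≠ [] := by
  obtain ⟨y, hy, hyne⟩ :=
    pv_exists_other (PySem.Set.ofList eps) (PySem.Set.nodup_ofList eps) hlen h1
  intro hnil
  have := List.filter_eq_nil_iff.1 hnil y ((PySem.Set.mem_ofList _ _).1 hy)
  simp at this
  exact hyne this.symm

-- A's per-range step, characterised as skip-or-update-fold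
theorem pv_step_eq (m : PySem.Dict String (PySem.Set String)) (eps : List String) :
    eps.foldl (fun m host1 =>
      eps.foldl (fun m host2 =>
        if host1 ≠ host2 then m.modify host1 [] (fun s => PySem.Set.add s host2) else m) m) m
    = (if (PySem.Set.ofList eps).length < 2 then m
       else eps.foldl (fun m host =>
         m.modify host []
           (fun s => PySem.Set.update s (PySem.Set.diff (PySem.Set.ofList eps) [host]))) m) := by
  by_cases hlen : (PySem.Set.ofList eps).length < 2
  · rw [if_pos hlen,
      PySem.List.foldl_congr_mem eps _ (fun m _ => m) m (by
        intro acc x hx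
        rw [pv_innerA, if_pos (pv_filter_nil_of_small eps x hx hlen)]),
      PySem.List.foldl_ignore]
  · rw [if_neg hlen]
    apply PySem.List.foldl_congr_mem
    intro acc x hx
    rw [pv_innerA, if_neg (pv_filter_ne_nil_of_big eps x hlen)]

-- B's set-comprehension predicate is the proof-side predicate
theorem pv_filter_bne (k : String) (xs : List String) :
    xs.filter (fun e => e != k) = xs.filter (fun x => decide (k ≠ x)) := by
  refine List.filter_congr ?_
  intro a _
  by_cases h : a = k
  · simp [h]
  · simp [bne, h, Ne.symm h]

-- one A-update at key k tracks one pool-append at key k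
theorem pv_value (pool eps : List String) (k : String) :
    PySem.Set.update (PySem.Set.ofList (pool.filter (fun x => decide (k ≠ x))))
      (PySem.Set.diff (PySem.Set.ofList eps) [k])
    = PySem.Set.ofList ((pool ++ eps).filter (fun x => decide (k ≠ x))) := by
  rw [pv_diff_singleton, pv_update_ofList, List.filter_append, PySem.Set.ofList_append]

-- the per-range folds preserve the value invariant
theorem pv_fold_getD (eps hs : List String) (dA : PySem.Dict String (PySem.Set String))
    (g : PySem.Dict String (List String))
    (hv : ∀ k, dA.getD k [] = PySem.Set.ofList ((g.getD k []).filter (fun x => decide (k ≠ x))))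
    (k : String) :
    (hs.foldl (fun m host =>
        m.modify host [] (fun s => PySem.Set.update s (PySem.Set.diff (PySem.Set.ofList eps) [host]))) dA).getD k []
    = PySem.Set.ofList
        (((hs.foldl (fun g host => g.modify host [] (fun pool => pool ++ eps)) g).getD k []).filter
          (fun x => decide (k ≠ x))) := by
  induction hs generalizing dA g with
  | nil => exact hv k
  | cons h rest ih =>
    simp only [List.foldl_cons]
    refine ih _ _ ?_
    intro k'
    rw [PySem.Dict.getD_modify, PySem.Dict.getD_modify]
    by_cases hk : k' = h
    · subst hk
      rw [if_pos rfl, if_pos rfl, hv, pv_value]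
    · rw [if_neg hk, if_neg hk, hv]

-- the whole loops: equal key lists (nodup) and the value invariant
theorem pv_main (ranges : List (List (String × List String)))
    (dA : PySem.Dict String (PySem.Set String)) (g : PySem.Dict String (List String))
    (hk : dA.keys = g.keys) (hnd : g.keys.Nodup)
    (hv : ∀ k, dA.getD k [] = PySem.Set.ofList ((g.getD k []).filter (fun x => decide (k ≠ x)))) :
    (ranges.foldl (fun (m : PySem.Dict String (PySem.Set String)) r =>
        let eps := ((PySem.Dict.ofList r).get? "endpoints").getD []
        eps.foldl (fun m host1 =>
          eps.foldl (fun m host2 =>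
            if host1 ≠ host2 then m.modify host1 [] (fun s => PySem.Set.add s host2) else m) m) m) dA).keys
      = (ranges.foldl (fun (g : PySem.Dict String (List String)) r =>
          let endpoints := ((PySem.Dict.ofList r).get? "endpoints").getD []
          if 1 < (PySem.Set.ofList endpoints).length then
            endpoints.foldl (fun g host => g.modify host [] (fun pool => pool ++ endpoints)) g
          else g) g).keys
    ∧ (ranges.foldl (fun (g : PySem.Dict String (List String)) r =>
          let endpoints := ((PySem.Dict.ofList r).get? "endpoints").getD []
          if 1 < (PySem.Set.ofList endpoints).length then
            endpoints.foldl (fun g host => g.modify host [] (fun pool => pool ++ endpoints)) g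
          else g) g).keys.Nodup
    ∧ ∀ k, (ranges.foldl (fun (m : PySem.Dict String (PySem.Set String)) r =>
          let eps := ((PySem.Dict.ofList r).get? "endpoints").getD []
          eps.foldl (fun m host1 =>
            eps.foldl (fun m host2 =>
              if host1 ≠ host2 then m.modify host1 [] (fun s => PySem.Set.add s host2) else m) m) m) dA).getD k []
        = PySem.Set.ofList
            (((ranges.foldl (fun (g : PySem.Dict String (List String)) r =>
                let endpoints := ((PySem.Dict.ofList r).get? "endpoints").getD []
                if 1 < (PySem.Set.ofList endpoints).length then
                  endpoints.foldl (fun g host => g.modify host [] (fun pool => pool ++ endpoints)) g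
                else g) g).getD k []).filter (fun x => decide (k ≠ x))) := by
  induction ranges generalizing dA g with
  | nil => exact ⟨hk, hnd, hv⟩
  | cons r rest ih =>
    simp only [List.foldl_cons]
    set eps := ((PySem.Dict.ofList r).get? "endpoints").getD [] with heps
    by_cases hlen : (PySem.Set.ofList eps).length < 2
    · have hb : ¬ 1 < (PySem.Set.ofList eps).length := by omega
      rw [pv_step_eq dA eps]
      simp only [if_pos hlen, if_neg hb]
      exact ih dA g hk hnd hv
    · have hb : 1 < (PySem.Set.ofList eps).length := by omega
      rw [pv_step_eq dA eps]
      simp only [if_neg hlen, if_pos hb]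
      refine ih _ _ ?_ ?_ ?_
      · rw [PySem.Dict.keys_foldl_modify, PySem.Dict.keys_foldl_modify, hk]
      · rw [PySem.Dict.keys_foldl_modify]
        exact PySem.Set.nodup_update _ _ hnd
      · exact pv_fold_getD eps eps dA g hv

-- ===== VERDICT (by name: the statement is the Claim_ definition above) =====
theorem parse_range_mapping_py_spec : Claim_equal_parse_range_mapping_py := by
  intro ranges _ _
  unfold Spec_parse_range_mapping_py parse_range_mapping_py parse_range_mapping_py_alt
  obtain ⟨hk, hnd, hv⟩ := pv_main ranges PySem.Dict.empty PySem.Dict.empty rfl (by simp) (by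
    intro k; rfl)
  set dA := ranges.foldl _ PySem.Dict.empty
  set g := ranges.foldl _ PySem.Dict.empty
  rw [PySem.Dict.items_eq_map_keys dA (hk ▸ hnd) [],
    PySem.Dict.items_eq_map_keys g hnd [], hk, List.map_map]
  refine List.map_congr_left ?_
  intro k _
  simp only [Function.comp]
  rw [hv k, pv_filter_bne]
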